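-- pv_equiv track=rewrite | github.com/coin-cidence/Programmers | 프로그래머스/2/42586. 기능개발/기능개발.py | solution
-- ===== SOURCE A (Python) =====
-- def solution(progresses, speeds):
--     from collections import deque
--     queue = deque()
--     answer = []
--     count = 0
--
--     for idx, i in enumerate(progresses):
--         time = (100-i)//speeds[idx]
--         if (100-i)%speeds[idx]  == 0:
--             queue.append(time)
--         else:
--             queue.append(time + 1)
--
--     while queue:
--         standard = queue.popleft()
--         count += 1
--
--         while queue and standard>=queue[0]:
--             queue.popleft()
--             count += 1
--         answer.append(count)
--         count = 0
--     return answer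
-- ===== SOURCE B (Python) =====
-- def solution(progresses, speeds):
--     answer = []
--     maxday = 0
--     for p, s in zip(progresses, speeds):
--         day = (100 - p) // s
--         if (100 - p) % s != 0:
--             day += 1
--         if not answer or day > maxday:
--             answer.append(1)
--             maxday = day
--         else:
--             answer[-1] += 1
--     return answer
-- ===== Notes on version B (the rewrite author's own statement) =====
-- stated objective: simpler
-- what changed: Replaces the deque build plus nested while-popping with one flat zip pass that keeps a running group-leader day and either appends a new group of 1 or increments the last counter.
import Mathlib
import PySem

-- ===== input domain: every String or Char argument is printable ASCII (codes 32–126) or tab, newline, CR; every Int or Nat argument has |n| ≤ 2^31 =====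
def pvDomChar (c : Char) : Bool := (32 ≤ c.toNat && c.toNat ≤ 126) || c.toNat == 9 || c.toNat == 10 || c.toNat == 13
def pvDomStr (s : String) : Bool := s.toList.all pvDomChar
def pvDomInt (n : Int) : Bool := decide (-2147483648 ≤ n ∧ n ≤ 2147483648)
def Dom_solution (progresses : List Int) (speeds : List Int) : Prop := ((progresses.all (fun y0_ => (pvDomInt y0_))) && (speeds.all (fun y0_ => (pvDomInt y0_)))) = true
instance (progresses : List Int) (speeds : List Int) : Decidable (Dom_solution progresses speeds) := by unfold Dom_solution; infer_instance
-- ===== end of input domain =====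

-- B replaces A's deque build + nested popping loops with one flat zip pass keeping a
-- running group-leader day (simpler decomposition; same O(n) cost).


-- ===== PORT A =====
-- for idx, i in enumerate(progresses): queue.append(ceil-day via // and %); none = the exception
def buildA (speeds : List Int) : List (Int × Int) → List Int → Option (List Int)
  | [], queue => some queue
  | (idx, i) :: rest, queue =>
    match PySem.List.pyGet? speeds idx with
    | none => none                      -- IndexError
    | some s =>
      match PySem.Int.floordiv? (100 - i) s with
      | none => none                    -- ZeroDivisionError
      | some time =>
        if PySem.Int.mod (100 - i) s = 0 then buildA speeds rest (queue ++ [time])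
        else buildA speeds rest (queue ++ [time + 1])

-- inner 'while queue and standard >= queue[0]': returns (count, remaining queue)
def innerA (standard : Int) (count : Int) : List Int → Int × List Int
  | [] => (count, [])
  | q :: rest => if standard ≥ q then innerA standard (count + 1) rest else (count, q :: rest)

theorem innerA_len (standard count : Int) : ∀ l : List Int, (innerA standard count l).2.length ≤ l.length := by
  intro l
  induction l generalizing count with
  | nil => simp [innerA]
  | cons q rest ih =>
    simp only [innerA]
    split
    · exact (ih (count + 1)).trans (by simp)
    · simp

-- outer 'while queue'
def outerA : List Int → List Int
  | [] => []
  | q :: rest =>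
    let r := innerA q 1 rest
    r.1 :: outerA r.2
termination_by l => l.length
decreasing_by
  simpa using Nat.lt_succ_of_le (innerA_len q 1 rest)

def solution (progresses : List Int) (speeds : List Int) : List Int :=
  ((buildA speeds (PySem.List.enumerate progresses 0) []).map outerA).getD []

-- ===== PORT B =====
-- answer[-1] += 1
def incLast : List Int → List Int
  | [] => []
  | [x] => [x + 1]
  | x :: xs => x :: incLast xs

-- single pass over zip(progresses, speeds) with running leader day m
def loopB : List (Int × Int) → List Int → Int → Option (List Int)
  | [], ans, _ => some ans
  | (p, s) :: rest, ans, m =>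
    match PySem.Int.floordiv? (100 - p) s with
    | none => none                      -- ZeroDivisionError
    | some q =>
      let day := if PySem.Int.mod (100 - p) s ≠ 0 then q + 1 else q
      if ans = [] ∨ day > m then loopB rest (ans ++ [1]) day
      else loopB rest (incLast ans) m

def solution_alt (progresses : List Int) (speeds : List Int) : List Int :=
  (loopB (progresses.zip speeds) [] 0).getD []

-- ===== PRECONDITION & SPEC =====
-- Pre_: A raises IndexError when speeds is shorter than progresses, and ZeroDivisionError
-- when a paired speed is 0; exactly those inputs are excluded.
def Pre_solution (progresses : List Int) (speeds : List Int) : Prop :=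
  progresses.length ≤ speeds.length ∧ ∀ s ∈ speeds.take progresses.length, s ≠ 0
instance (progresses : List Int) (speeds : List Int) : Decidable (Pre_solution progresses speeds) := by unfold Pre_solution; infer_instance

def pvWitness_solution : List Int × List Int := ([93, 30, 55], [1, 30, 5])

def Spec_solution (progresses : List Int) (speeds : List Int) (out : List Int) : Prop := out = solution_alt progresses speeds
instance (progresses : List Int) (speeds : List Int) (out : List Int) : Decidable (Spec_solution progresses speeds out) := by unfold Spec_solution; infer_instance

-- ===== CLAIM (what is proved, stated in full; the proofs are below) =====
def Claim_equal_solution : Prop := ∀ (progresses : List Int) (speeds : List Int), Dom_solution progresses speeds → Pre_solution progresses speeds → Spec_solution progresses speeds (solution progresses speeds)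

-- ===== LEMMAS AND PROOFS =====
-- the ceiling day both programs compute for one (progress, speed) pair
def dayOf (p s : Int) : Int :=
  if PySem.Int.mod (100 - p) s = 0 then PySem.Int.floordiv (100 - p) s
  else PySem.Int.floordiv (100 - p) s + 1

-- the pure grouping pass that loopB performs once every division is defined
def gB : List Int → List Int → Int → List Int
  | [], ans, _ => ans
  | d :: ds, ans, m =>
    if ans = [] ∨ d > m then gB ds (ans ++ [1]) d else gB ds (incLast ans) m

theorem incLast_append (ans : List Int) (c : Int) : incLast (ans ++ [c]) = ans ++ [c + 1] := by
  induction ans with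
  | nil => rfl
  | cons x xs ih =>
    cases xs with
    | nil => rfl
    | cons y ys => simpa [incLast] using ih

theorem buildA_eq : ∀ (xs pre rest queue : List Int),
    xs.length ≤ rest.length → (∀ s ∈ rest.take xs.length, s ≠ 0) →
    buildA (pre ++ rest) (PySem.List.enumerate xs (pre.length : Int)) queue
      = some (queue ++ xs.zipWith dayOf rest) := by
  intro xs
  induction xs with
  | nil => intro pre rest queue _ _; simp [PySem.List.enumerate, buildA]
  | cons x xs ih =>
    intro pre rest queue hlen hnz
    cases rest with
    | nil => simp at hlen
    | cons r rest =>
      have hr : r ≠ 0 := hnz r (by simp)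
      have hget : PySem.List.pyGet? (pre ++ r :: rest) (pre.length : Int) = some r :=
        PySem.List.pyGet?_append_length pre rest r
      have hdiv : PySem.Int.floordiv? (100 - x) r = some (PySem.Int.floordiv (100 - x) r) := by
        simp [PySem.Int.floordiv?, PySem.Int.floordiv, hr]
      have ih' := ih (pre ++ [r]) rest
      simp only [List.length_append, List.length_cons, List.length_nil] at ih'
      have step : ∀ q', buildA (pre ++ r :: rest) (PySem.List.enumerate xs ((pre.length : Int) + 1)) q'
          = some (q' ++ xs.zipWith dayOf rest) := by
        intro q'
        have : pre ++ r :: rest = (pre ++ [r]) ++ rest := by simp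
        rw [this]
        have := ih' q' (by simpa using hlen) (by intro s hs; exact hnz s (by simp [hs]))
        push_cast at this ⊢
        exact this
      simp only [PySem.List.enumerate_cons, buildA, hget, hdiv]
      split_ifs with hm <;> rw [step] <;> simp [dayOf, hm]

theorem loopB_eq : ∀ (xs rest : List Int) (ans : List Int) (m : Int),
    xs.length ≤ rest.length → (∀ s ∈ rest.take xs.length, s ≠ 0) →
    loopB (xs.zip rest) ans m = some (gB (xs.zipWith dayOf rest) ans m) := by
  intro xs
  induction xs with
  | nil => intro rest ans m _ _; simp [loopB, gB]
  | cons x xs ih =>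
    intro rest ans m hlen hnz
    cases rest with
    | nil => simp at hlen
    | cons r rest =>
      have hr : r ≠ 0 := hnz r (by simp)
      have hdiv : PySem.Int.floordiv? (100 - x) r = some (PySem.Int.floordiv (100 - x) r) := by
        simp [PySem.Int.floordiv?, PySem.Int.floordiv, hr]
      have hday : (if PySem.Int.mod (100 - x) r ≠ 0 then PySem.Int.floordiv (100 - x) r + 1
          else PySem.Int.floordiv (100 - x) r) = dayOf x r := by
        by_cases hm : PySem.Int.mod (100 - x) r = 0 <;> simp [dayOf, hm]
      have ih' := fun ans' m' => ih rest ans' m' (by simpa using hlen)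
        (by intro s hs; exact hnz s (by simp [hs]))
      simp only [List.zip_cons_cons, List.zipWith_cons_cons, loopB, hdiv, gB, hday]
      split <;> simp [ih']

theorem outerA_nil : outerA [] = [] := by rw [outerA]

theorem outerA_cons (q : Int) (rest : List Int) :
    outerA (q :: rest) = (innerA q 1 rest).1 :: outerA (innerA q 1 rest).2 := by rw [outerA]

theorem gB_eq_outer : ∀ (ds ans : List Int) (c m : Int),
    gB ds (ans ++ [c]) m = ans ++ (innerA m c ds).1 :: outerA (innerA m c ds).2 := by
  intro ds
  induction ds with
  | nil => intro ans c m; simp [gB, innerA, outerA_nil]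
  | cons d ds ih =>
    intro ans c m
    simp only [gB, innerA]
    by_cases hd : d > m
    · have hnot : ¬ m ≥ d := by omega
      rw [if_pos (Or.inr hd), if_neg hnot, ih (ans ++ [c]) 1 d, outerA_cons]
      simp
    · have hm : m ≥ d := by omega
      rw [if_neg (by simp [hd]), if_pos hm, incLast_append]
      exact ih ans (c + 1) m

theorem gB_nil_eq_outer (ds : List Int) : gB ds [] 0 = outerA ds := by
  cases ds with
  | nil => rw [gB, outerA_nil]
  | cons d ds =>
    rw [gB, if_pos (Or.inl rfl), outerA_cons]
    simpa using gB_eq_outer ds [] 1 d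

-- ===== VERDICT (by name: the statement is the Claim_ definition above) =====
theorem solution_spec : Claim_equal_solution := by
  intro progresses speeds _ hpre
  obtain ⟨hlen, hnz⟩ := hpre
  unfold Spec_solution solution solution_alt
  have hA := buildA_eq progresses [] speeds [] hlen hnz
  simp only [List.nil_append, List.length_nil, Int.natCast_zero] at hA
  have hB := loopB_eq progresses speeds [] 0 hlen hnz
  rw [hA, hB]
  simp [gB_nil_eq_outer]
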